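-- pv_equiv track=rewrite | github.com/anon-repo77777/CI-VID | construction_functions/entity_based_segment.py | find_subsequences_with_conditions
-- ===== SOURCE A (Python) =====
-- def find_subsequences_with_conditions(lst, max_gap=3, min_length=2):
--     """
--     Find subsequences in a list that satisfy the following conditions:
--     - Consecutive elements differ by no more than `max_gap`
--     - Each subsequence is at least `min_length` in length
--
--     Returns:
--         List of valid subsequences
--     """
--
--     subsequences = []  # A list of substrings that match the conditions
--
--     if len(lst) == 0:
--         return []
--
--     current_subseq = [lst[0]]  # The initial substring contains the first element
--
--     for i in range(1, len(lst)):
--         # Determine whether the difference between the current number and the previous number is within the maximum allowed interval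
--         current_value = int(lst[i][0].split('/')[-1].split('_')[0])
--         prev_value = int(lst[i - 1][0].split('/')[-1].split('_')[0])
--         # Determine whether the difference between the current number and the previous number is within the maximum interval
--         if current_value - prev_value <= max_gap:
--             # If the length of the current substring is less than 10, add the current element
--             if len(current_subseq) < 10:
--                 current_subseq.append(lst[i])  # If the conditions are met, add the current substring
--             else:
--                 # If the current substring is full, add it to the result list and start a new substring
--                 subsequences.append(current_subseq)
--                 current_subseq = [lst[i]]  # 重新开始新的子串
--         else:
--             # If the length of the current substring is greater than the minimum length, it is added to the result
--             if len(current_subseq) >= min_length: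
--                 subsequences.append(current_subseq)
--             current_subseq = [lst[i]]  # 重新开始新的子串
--
--     # Check the current substring one last time to make sure it is added to the result
--     if len(current_subseq) >= min_length:
--         subsequences.append(current_subseq)
--
--     return subsequences
-- ===== SOURCE B (Python) =====
-- def find_subsequences_with_conditions(lst, max_gap=3, min_length=2):
--     """Two-phase rewrite: split the list into maximal gap-satisfying runs,
--     then cut each run into chunks of 10 (all but the last kept
--     unconditionally, the last kept only if it is at least min_length)."""
--     if not lst:
--         return []
--     if len(lst) == 1:
--         return [lst] if min_length <= 1 else []
--     vals = [int(e[0].split('/')[-1].split('_')[0]) for e in lst]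
--     runs = []
--     run = [lst[0]]
--     for x, v0, v1 in zip(lst[1:], vals, vals[1:]):
--         if v1 - v0 <= max_gap:
--             run.append(x)
--         else:
--             runs.append(run)
--             run = [x]
--     runs.append(run)
--     out = []
--     for r in runs:
--         chunks = [r[j:j+10] for j in range(0, len(r), 10)]
--         out.extend(chunks[:-1])
--         if len(chunks[-1]) >= min_length:
--             out.append(chunks[-1])
--     return out
-- ===== Notes on version B (the rewrite author's own statement) =====
-- stated objective: alternative
-- what changed: A interleaves gap-checking, the 10-cap flush and the min_length gate in one stateful loop; B is a two-phase pipeline that first splits the list into maximal gap-satisfying runs and then cuts each run into chunks of 10, keeping every non-last chunk unconditionally and the last chunk only if it is at least min_length.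
import Mathlib
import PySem

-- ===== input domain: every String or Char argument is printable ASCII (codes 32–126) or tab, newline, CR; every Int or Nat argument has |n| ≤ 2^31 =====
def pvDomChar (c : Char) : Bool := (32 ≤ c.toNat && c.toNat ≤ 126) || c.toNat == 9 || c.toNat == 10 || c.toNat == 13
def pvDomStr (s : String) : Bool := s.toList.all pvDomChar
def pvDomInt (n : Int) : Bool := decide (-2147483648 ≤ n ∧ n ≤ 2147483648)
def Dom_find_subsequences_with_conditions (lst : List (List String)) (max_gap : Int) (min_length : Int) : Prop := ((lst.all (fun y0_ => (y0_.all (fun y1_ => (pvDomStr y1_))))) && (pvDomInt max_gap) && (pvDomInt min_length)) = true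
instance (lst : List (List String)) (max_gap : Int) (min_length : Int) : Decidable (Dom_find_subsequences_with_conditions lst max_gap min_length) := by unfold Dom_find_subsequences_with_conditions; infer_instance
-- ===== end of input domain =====

-- B replaces A's single stateful loop by a two-phase pipeline (split into maximal
-- gap-satisfying runs, then chunk each run) — objective: alternative decomposition.


-- shared parsing helper: int(e[0].split('/')[-1].split('_')[0]); none where Python raises
-- (IndexError on an empty element, ValueError on a non-int piece)
def pvParse? (e : List String) : Option Int :=
  match e with
  | [] => none
  | s :: _ =>
      PySem.Int.ofStr? ((((PySem.Str.split? (((PySem.Str.split? s "/").getD []).getLastD "") "_")).getD []).headD "")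

-- total form used by both ports; the default 0 is never reached under Pre_
def pvVal (e : List String) : Int := (pvParse? e).getD 0

-- ===== PORT A =====
-- A's for-loop over i in range(1, len(lst)) reads only lst[i] and lst[i-1]; it is
-- transliterated as the structural recursion carrying the previous element and the
-- same (subsequences, current_subseq) state, branches in A's order.
def pvGoA (max_gap min_length : Int) (prev : List String) (rest : List (List String))
    (subs : List (List (List String))) (cur : List (List String)) : List (List (List String)) :=
  match rest with
  | [] => if min_length ≤ (cur.length : Int) then subs ++ [cur] else subs
  | x :: xs =>
      if pvVal x - pvVal prev ≤ max_gap then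
        if cur.length < 10 then
          pvGoA max_gap min_length x xs subs (cur ++ [x])
        else
          pvGoA max_gap min_length x xs (subs ++ [cur]) [x]
      else
        if min_length ≤ (cur.length : Int) then
          pvGoA max_gap min_length x xs (subs ++ [cur]) [x]
        else
          pvGoA max_gap min_length x xs subs [x]

def find_subsequences_with_conditions (lst : List (List String)) (max_gap : Int) (min_length : Int) : List (List (List String)) :=
  match lst with
  | [] => []
  | a :: rest => pvGoA max_gap min_length a rest [] [a]

-- ===== PORT B =====
-- body of B's run-splitting loop over zip(lst[1:], vals, vals[1:])
def pvStepRun (max_gap : Int) (st : List (List (List String)) × List (List String))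
    (t : List String × Int × Int) : List (List (List String)) × List (List String) :=
  if t.2.2 - t.2.1 ≤ max_gap then (st.1, st.2 ++ [t.1]) else (st.1 ++ [st.2], [t.1])

-- body of B's output loop over runs: chunks = [r[j:j+10] for j in range(0, len(r), 10)]
def pvEmitRun (min_length : Int) (out : List (List (List String))) (r : List (List String)) : List (List (List String)) :=
  let chunks := (PySem.List.pyRange 0 (r.length : Int) 10).map
    (fun j => PySem.List.slice r (some j) (some (j + 10)))
  out ++ PySem.List.slice chunks none (some (-1)) ++
    (if min_length ≤ ((((PySem.List.pyGet? chunks (-1)).getD []).length : Int)) then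
      [(PySem.List.pyGet? chunks (-1)).getD []] else [])

def find_subsequences_with_conditions_alt (lst : List (List String)) (max_gap : Int) (min_length : Int) : List (List (List String)) :=
  match lst with
  | [] => []
  | a :: rest =>
    match rest with
    | [] => if min_length ≤ 1 then [[a]] else []
    | _ :: _ =>
      let vals := (a :: rest).map pvVal
      let st := (rest.zip (vals.zip (vals.drop 1))).foldl (pvStepRun max_gap) ([], [a])
      (st.1 ++ [st.2]).foldl (pvEmitRun min_length) []

-- ===== PRECONDITION & SPEC =====
-- Pre_ excludes exactly the inputs on which Python A raises: with two or more
-- elements, every element must be nonempty and its parsed piece a valid int literal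
-- (a singleton or empty list is never parsed by A).
def Pre_find_subsequences_with_conditions (lst : List (List String)) (max_gap : Int) (min_length : Int) : Prop :=
  lst.length ≤ 1 ∨ ∀ e ∈ lst, pvParse? e ≠ none
instance (lst : List (List String)) (max_gap : Int) (min_length : Int) : Decidable (Pre_find_subsequences_with_conditions lst max_gap min_length) := by unfold Pre_find_subsequences_with_conditions; infer_instance

def pvWitness_find_subsequences_with_conditions : List (List String) × Int × Int :=
  ([[ "a/1_x", "t" ], [ "a/3_y" ], [ "b/9" ]], 3, 2)

def Spec_find_subsequences_with_conditions (lst : List (List String)) (max_gap : Int) (min_length : Int) (out : List (List (List String))) : Prop := out = find_subsequences_with_conditions_alt lst max_gap min_length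
instance (lst : List (List String)) (max_gap : Int) (min_length : Int) (out : List (List (List String))) : Decidable (Spec_find_subsequences_with_conditions lst max_gap min_length out) := by unfold Spec_find_subsequences_with_conditions; infer_instance

-- ===== CLAIM (what is proved, stated in full; the proofs are below) =====
def Claim_equal_find_subsequences_with_conditions : Prop := ∀ (lst : List (List String)) (max_gap : Int) (min_length : Int), Dom_find_subsequences_with_conditions lst max_gap min_length → Pre_find_subsequences_with_conditions lst max_gap min_length → Spec_find_subsequences_with_conditions lst max_gap min_length (find_subsequences_with_conditions lst max_gap min_length)

-- ===== LEMMAS AND PROOFS =====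

-- proof-only semantic functions: runs and chunks, structurally

-- runsCont g prev rest = (tail of the run continuing through prev, the later runs)
def pvRunsCont (g : Int) (prev : List String) : List (List String) → List (List String) × List (List (List String))
  | [] => ([], [])
  | x :: xs =>
      let p := pvRunsCont g x xs
      if pvVal x - pvVal prev ≤ g then (x :: p.1, p.2) else ([], (x :: p.1) :: p.2)

def pvChunks10 (r : List (List String)) : List (List (List String)) :=
  if r = [] then [] else r.take 10 :: pvChunks10 (r.drop 10)
termination_by r.length
decreasing_by
  rename_i h
  have : r.length ≠ 0 := by simpa [List.length_eq_zero_iff] using h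
  simp only [List.length_drop]; omega

def pvEmit (m : Int) (r : List (List String)) : List (List (List String)) :=
  (pvChunks10 r).dropLast ++
    (if m ≤ (((pvChunks10 r).getLastD []).length : Int) then [(pvChunks10 r).getLastD []] else [])

theorem pvChunks10_ne_nil (r : List (List String)) (h : r ≠ []) : pvChunks10 r ≠ [] := by
  rw [pvChunks10]; simp [h]

theorem pvChunks10_small (r : List (List String)) (h : r ≠ []) (hle : r.length ≤ 10) :
    pvChunks10 r = [r] := by
  rw [pvChunks10]
  simp [h, List.take_of_length_le hle, List.drop_of_length_le hle, pvChunks10]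

theorem pvChunks10_step (r ys : List (List String)) (h10 : r.length = 10) (_hys : ys ≠ []) :
    pvChunks10 (r ++ ys) = r :: pvChunks10 ys := by
  have hr : r ≠ [] := by intro he; simp [he] at h10
  have hne : ¬ (r ++ ys = []) := by simp [hr]
  rw [pvChunks10, if_neg hne, ← h10, List.take_left, List.drop_left]

theorem pvGetLastD_tail {α : Type} (r : α) (l : List α) (d : α) (h : l ≠ []) :
    (r :: l).getLastD d = l.getLastD d := by
  cases l with
  | nil => exact absurd rfl h
  | cons c cs => simp

theorem pvEmit_small (m : Int) (r : List (List String)) (h : r ≠ []) (hle : r.length ≤ 10) :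
    pvEmit m r = if m ≤ (r.length : Int) then [r] else [] := by
  simp [pvEmit, pvChunks10_small r h hle]

theorem pvEmit_step (m : Int) (r ys : List (List String)) (h10 : r.length = 10) (hys : ys ≠ []) :
    pvEmit m (r ++ ys) = r :: pvEmit m ys := by
  have hc := pvChunks10_ne_nil ys hys
  rw [pvEmit, pvEmit, pvChunks10_step r ys h10 hys, List.dropLast_cons_of_ne_nil hc,
    pvGetLastD_tail _ _ _ hc]
  simp

-- characterisation of A's loop
theorem pvGoA_eq (g m : Int) (rest : List (List String)) :
    ∀ (prev : List String) (subs : List (List (List String))) (cur : List (List String)),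
      cur ≠ [] → cur.length ≤ 10 →
      pvGoA g m prev rest subs cur =
        subs ++ pvEmit m (cur ++ (pvRunsCont g prev rest).1) ++
          ((pvRunsCont g prev rest).2).flatMap (pvEmit m) := by
  induction rest with
  | nil =>
      intro prev subs cur hne hle
      simp [pvGoA, pvRunsCont, pvEmit_small m cur hne hle]
      split <;> simp
  | cons x xs ih =>
      intro prev subs cur hne hle
      rw [pvGoA, pvRunsCont]
      by_cases hg : pvVal x - pvVal prev ≤ g
      · simp only [hg, if_pos]
        by_cases hlt : cur.length < 10
        · rw [if_pos hlt, ih x subs (cur ++ [x]) (by simp) (by simp; omega)]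
          simp
        · have h10 : cur.length = 10 := by omega
          rw [if_neg hlt, ih x (subs ++ [cur]) [x] (by simp) (by simp)]
          have : cur ++ (x :: (pvRunsCont g x xs).1) = cur ++ ([x] ++ (pvRunsCont g x xs).1) := by simp
          rw [this, pvEmit_step m cur ([x] ++ (pvRunsCont g x xs).1) h10 (by simp)]
          simp
      · simp only [hg, if_false]
        by_cases hm : m ≤ (cur.length : Int)
        · rw [if_pos hm, ih x (subs ++ [cur]) [x] (by simp) (by simp)]
          simp [pvEmit_small m cur hne hle, hm]
        · rw [if_neg hm, ih x subs [x] (by simp) (by simp)]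
          simp [pvEmit_small m cur hne hle, hm]

-- the triple list B zips, and its unfolding
def pvZs (prev : List String) (rest : List (List String)) : List (List String × Int × Int) :=
  rest.zip (((prev :: rest).map pvVal).zip ((rest).map pvVal))

theorem pvZs_cons (prev x : List String) (xs : List (List String)) :
    pvZs prev (x :: xs) = (x, pvVal prev, pvVal x) :: pvZs x xs := by
  simp [pvZs]

-- characterisation of B's run-splitting fold
theorem pvFoldRuns_eq (g : Int) (rest : List (List String)) :
    ∀ (prev : List String) (runs : List (List (List String))) (run : List (List String)),
      ((pvZs prev rest).foldl (pvStepRun g) (runs, run)).1 ++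
        [((pvZs prev rest).foldl (pvStepRun g) (runs, run)).2] =
      runs ++ (run ++ (pvRunsCont g prev rest).1) :: (pvRunsCont g prev rest).2 := by
  induction rest with
  | nil => intro prev runs run; simp [pvZs, pvRunsCont]
  | cons x xs ih =>
      intro prev runs run
      rw [pvZs_cons, pvRunsCont]
      by_cases hg : pvVal x - pvVal prev ≤ g
      · simp only [List.foldl_cons, pvStepRun, hg, if_pos]
        have := ih x runs (run ++ [x])
        simp only at this ⊢
        rw [this]; simp
      · simp only [List.foldl_cons, pvStepRun, hg, if_false]
        have := ih x (runs ++ [run]) [x]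
        simp only at this ⊢
        rw [this]; simp
      
-- the chunk comprehension computes pvChunks10
theorem pvChunksR_aux (n : Nat) : ∀ (r : List (List String)), n = (r.length + 9) / 10 →
    (List.range n).map
        ((fun (j : Int) => PySem.List.slice r (some j) (some (j + 10))) ∘ (fun (k : Nat) => (0:Int) + 10 * (k : Int)))
      = pvChunks10 r := by
  induction n with
  | zero =>
      intro r hn
      have : r = [] := by
        have : r.length = 0 := by omega
        simpa [List.length_eq_zero_iff] using this
      subst this
      rw [pvChunks10]; simp
  | succ n ih =>
      intro r hn
      have hr : r ≠ [] := by
        intro he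
        subst he; simp at hn
      rw [List.range_succ_eq_map, List.map_cons, List.map_map, pvChunks10, if_neg hr]
      have c10 : (10:Int) = ((10:Nat):Int) := by norm_num
      congr 1
      case _ =>
        simp only [Function.comp_apply, Nat.cast_zero, mul_zero, zero_add]
        rw [PySem.List.slice_zero_start, PySem.List.slice_to r (by norm_num : (0:Int) ≤ 10)]
        rfl
      case _ =>
        have hmap : ∀ k ∈ List.range n,
            (((fun (j : Int) => PySem.List.slice r (some j) (some (j + 10))) ∘ (fun (k : Nat) => (0:Int) + 10 * (k : Int))) ∘ Nat.succ) k
              = ((fun (j : Int) => PySem.List.slice (r.drop 10) (some j) (some (j + 10))) ∘ (fun (k : Nat) => (0:Int) + 10 * (k : Int))) k := by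
          intro k _
          have e1 : ((0:Int) + 10 * ((Nat.succ k : Nat) : Int)) = ((10 * k + 10 : Nat) : Int) := by push_cast; ring
          have e3 : ((0:Int) + 10 * ((k : Nat) : Int)) = ((10 * k : Nat) : Int) := by push_cast; ring
          simp only [Function.comp_apply, e1, e3]
          rw [c10, PySem.List.slice_natCast_add, PySem.List.slice_natCast_add, List.drop_drop,
            Nat.add_comm 10 (10 * k)]
        rw [List.map_congr_left hmap]
        exact ih (r.drop 10) (by simp; omega)

theorem pvChunksR_eq (r : List (List String)) :
    (PySem.List.pyRange 0 (r.length : Int) 10).map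
        (fun (j : Int) => PySem.List.slice r (some j) (some (j + 10))) = pvChunks10 r := by
  rcases eq_or_ne r [] with he | hne
  · subst he
    rw [pvChunks10]
    simp [PySem.List.pyRange_of_pos 0 0 (by norm_num : (0:Int) < 10)]
  · have hL : 0 < r.length := List.length_pos_of_ne_nil hne
    rw [PySem.List.pyRange_of_pos 0 (r.length : Int) (by norm_num : (0:Int) < 10),
      if_pos (by exact_mod_cast hL), List.map_map]
    have hN : (((r.length : Int) - 0 + 10 - 1) / 10).toNat = (r.length + 9) / 10 := by
      omega
    rw [hN]
    exact pvChunksR_aux ((r.length + 9) / 10) r rfl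

-- pvEmitRun is pvEmit, accumulated
theorem pvEmitRun_eq (m : Int) (out : List (List (List String))) (r : List (List String)) :
    pvEmitRun m out r = out ++ pvEmit m r := by
  have hlast : ∀ (l : List (List (List String))),
      (PySem.List.pyGet? l (-1)).getD [] = l.getLastD [] := by
    intro l
    rw [PySem.List.pyGet?_neg_one l, ← List.getLastD_eq_getLast?]
  rw [pvEmitRun, pvEmit]
  simp only [pvChunksR_eq]
  rw [PySem.List.slice_to_neg_one, hlast]
  simp

theorem pvFoldEmit_eq (m : Int) (runsL : List (List (List String))) :
    ∀ out, runsL.foldl (pvEmitRun m) out = out ++ runsL.flatMap (pvEmit m) := by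
  induction runsL with
  | nil => simp
  | cons r rs ih => intro out; simp [pvEmitRun_eq, ih, List.flatMap_cons]

-- ===== VERDICT (by name: the statement is the Claim_ definition above) =====
theorem find_subsequences_with_conditions_spec : Claim_equal_find_subsequences_with_conditions := by
  intro lst g m _ _
  unfold Spec_find_subsequences_with_conditions
  match lst with
  | [] => rfl
  | [a] => simp [find_subsequences_with_conditions, find_subsequences_with_conditions_alt, pvGoA]
  | a :: b :: xs =>
      have hz : (b :: xs).zip ((((a :: b :: xs).map pvVal)).zip (((a :: b :: xs).map pvVal).drop 1))
          = pvZs a (b :: xs) := by simp [pvZs]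
      simp only [find_subsequences_with_conditions, find_subsequences_with_conditions_alt]
      rw [pvGoA_eq g m (b :: xs) a [] [a] (by simp) (by simp)]
      simp only [List.map_cons, List.drop_succ_cons, List.drop_zero] at hz ⊢
      rw [hz, pvFoldEmit_eq, pvFoldRuns_eq]
      simp
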